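-- pv_equiv track=rewrite | github.com/fikriauliya/CS6.006 | local_peak_search.py | divide_and_conquer_2d_search
-- ===== SOURCE A (Python) =====
-- def divide_and_conquer_2d_search(seq):
--   (width, height) = (len(seq[0]), len(seq))
--
--   def divide_and_conquer_2d_search_rec(left, right):
--     def get_val(pos_y, pos_x):
--       if pos_x >= left and pos_x <= right and pos_y >= 0 and pos_y < height: return seq[pos_y][pos_x]
--       else: return None
--
--     pos_x = left + (right - left) // 2
--
--     vertical_slice = [seq[i][pos_x] for i in range(0, height)]
--     max_val = max(vertical_slice)
--     pos_y = vertical_slice.index(max_val)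
--     left_val = get_val(pos_y, pos_x - 1)
--     right_val = get_val(pos_y, pos_x + 1)
--
--     if left_val != None and right_val != None and max_val <= left_val and left_val == right_val:
--       return max(divide_and_conquer_2d_search_rec(left, pos_x - 1), divide_and_conquer_2d_search_rec(pos_x + 1, right))
--     elif left_val != None and max_val <= left_val:
--       return divide_and_conquer_2d_search_rec(left, pos_x - 1)
--     elif right_val != None and max_val <= right_val:
--       return divide_and_conquer_2d_search_rec(pos_x + 1, right)
--     else:
--       return max_val
--
--   return divide_and_conquer_2d_search_rec(0, width - 1)
-- ===== SOURCE B (Python) =====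
-- def divide_and_conquer_2d_search(seq):
--   (width, height) = (len(seq[0]), len(seq))
--
--   def step(left, right):
--     # one divide-and-conquer step: returns (ranges to explore, leaf value or None)
--     pos_x = left + (right - left) // 2
--     column = [row[pos_x] for row in seq]
--     max_val = max(column)
--     pos_y = column.index(max_val)
--
--     def val_at(px):
--       if left <= px <= right and 0 <= pos_y < height:
--         return seq[pos_y][px]
--       return None
--
--     lv = val_at(pos_x - 1)
--     rv = val_at(pos_x + 1)
--     go_left = lv is not None and max_val <= lv
--     go_right = rv is not None and max_val <= rv
--     if go_left and go_right and lv == rv: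
--       return [(left, pos_x - 1), (pos_x + 1, right)], None
--     if go_left:
--       return [(left, pos_x - 1)], None
--     if go_right:
--       return [(pos_x + 1, right)], None
--     return [], max_val
--
--   # explicit worklist instead of recursion; result accumulates the max of leaf values
--   result = None
--   stack = [(0, width - 1)]
--   while stack:
--     (left, right) = stack.pop()
--     children, leaf = step(left, right)
--     if children:
--       stack.extend(children)
--     else:
--       result = leaf if result is None else max(result, leaf)
--   return result
-- ===== Notes on version B (the rewrite author's own statement) =====
-- stated objective: alternative
-- what changed: Replaces A's divide-and-conquer recursion (combining child results with max at each return) by an explicit worklist of (left,right) column ranges and a running-maximum accumulator over the leaf values, popping ranges until the stack empties.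
-- outside the precondition, e.g. on divide_and_conquer_2d_search([[9, 1], [3]]): A returns 9, B returns 9
import Mathlib
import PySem

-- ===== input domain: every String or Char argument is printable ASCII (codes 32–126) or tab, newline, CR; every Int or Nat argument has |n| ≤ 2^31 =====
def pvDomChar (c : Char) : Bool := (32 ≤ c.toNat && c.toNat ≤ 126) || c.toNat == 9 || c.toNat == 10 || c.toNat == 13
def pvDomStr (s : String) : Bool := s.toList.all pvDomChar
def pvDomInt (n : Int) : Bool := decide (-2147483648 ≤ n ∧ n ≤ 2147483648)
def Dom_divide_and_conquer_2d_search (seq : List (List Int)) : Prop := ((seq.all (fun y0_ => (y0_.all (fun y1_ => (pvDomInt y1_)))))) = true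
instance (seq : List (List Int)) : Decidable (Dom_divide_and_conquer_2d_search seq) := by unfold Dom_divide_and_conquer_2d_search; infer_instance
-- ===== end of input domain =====

-- B re-implements A's recursive divide-and-conquer peak search as an explicit worklist loop
-- with a running-maximum accumulator (different decomposition; same value everywhere A returns).
-- Both ports carry a fuel parameter only to totalise the recursion; fuel is always sufficient
-- (proved below), so neither fuel-exhaustion default is ever reached.

-- ===== PORT A =====
-- A's nested get_val(pos_y, pos_x): seq[pos_y][pos_x] inside the current window, else None.
-- The pyGetD defaults are unreachable when the bounds test holds and the grid satisfies Pre_.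
def dcGetVal (seq : List (List Int)) (height left right pos_y pos_x : Int) : Option Int :=
  if pos_x ≥ left ∧ pos_x ≤ right ∧ pos_y ≥ 0 ∧ pos_y < height then
    some (PySem.List.pyGetD (PySem.List.pyGetD seq pos_y []) pos_x 0)
  else none

-- A's comprehension [seq[i][pos_x] for i in range(0, height)]
def dcSlice (seq : List (List Int)) (height pos_x : Int) : List Int :=
  (PySem.List.pyRange 0 height 1).map
    (fun i => PySem.List.pyGetD (PySem.List.pyGetD seq i []) pos_x 0)

-- A's inner recursion divide_and_conquer_2d_search_rec(left, right); fuel > right - left always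
def dcRec (seq : List (List Int)) (height : Int) (fuel : Nat) (left right : Int) : Int :=
  match fuel with
  | 0 => 0  -- unreachable: every recursive call strictly shrinks right - left
  | fuel + 1 =>
    let pos_x := left + PySem.Int.floordiv (right - left) 2
    let vertical_slice := dcSlice seq height pos_x
    let max_val := (PySem.List.max? vertical_slice (fun y => y)).getD 0
    let pos_y : Int := ((PySem.List.index? vertical_slice max_val).getD 0 : Nat)
    let left_val := dcGetVal seq height left right pos_y (pos_x - 1)
    let right_val := dcGetVal seq height left right pos_y (pos_x + 1)
    if left_val ≠ none ∧ right_val ≠ none ∧ max_val ≤ left_val.getD 0 ∧ left_val = right_val then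
      max (dcRec seq height fuel left (pos_x - 1)) (dcRec seq height fuel (pos_x + 1) right)
    else if left_val ≠ none ∧ max_val ≤ left_val.getD 0 then
      dcRec seq height fuel left (pos_x - 1)
    else if right_val ≠ none ∧ max_val ≤ right_val.getD 0 then
      dcRec seq height fuel (pos_x + 1) right
    else
      max_val

def divide_and_conquer_2d_search (seq : List (List Int)) : Int :=
  let width := PySem.List.len (PySem.List.pyGetD seq 0 [])
  let height := PySem.List.len seq
  dcRec seq height ((width - 1 - 0).toNat + 1) 0 (width - 1)

-- ===== PORT B =====
-- B's nested val_at(px): seq[pos_y][px] inside the current window, else None.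
def altValAt (seq : List (List Int)) (height left right pos_y px : Int) : Option Int :=
  if left ≤ px ∧ px ≤ right ∧ 0 ≤ pos_y ∧ pos_y < height then
    some (PySem.List.pyGetD (PySem.List.pyGetD seq pos_y []) px 0)
  else none

-- B's comprehension [row[pos_x] for row in seq]
def altColumn (seq : List (List Int)) (pos_x : Int) : List Int :=
  seq.map (fun row => PySem.List.pyGetD row pos_x 0)

-- B's step(left, right): the list of sub-windows to explore plus an optional leaf value.
def altStep (seq : List (List Int)) (height left right : Int) : List (Int × Int) × Option Int :=
  let pos_x := left + PySem.Int.floordiv (right - left) 2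
  let column := altColumn seq pos_x
  let max_val := (PySem.List.max? column (fun y => y)).getD 0
  let pos_y : Int := ((PySem.List.index? column max_val).getD 0 : Nat)
  let lv := altValAt seq height left right pos_y (pos_x - 1)
  let rv := altValAt seq height left right pos_y (pos_x + 1)
  if (lv ≠ none ∧ max_val ≤ lv.getD 0) ∧ (rv ≠ none ∧ max_val ≤ rv.getD 0) ∧ lv = rv then
    ([(left, pos_x - 1), (pos_x + 1, right)], none)
  else if lv ≠ none ∧ max_val ≤ lv.getD 0 then
    ([(left, pos_x - 1)], none)
  else if rv ≠ none ∧ max_val ≤ rv.getD 0 then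
    ([(pos_x + 1, right)], none)
  else
    ([], some max_val)

-- upper bound on the loop's remaining iterations, used as its fuel
def altMeasure (stack : List (Int × Int)) : Nat :=
  (stack.map (fun p => 2 ^ ((p.2 - p.1).toNat + 1))).sum

-- B's while loop: pop the top window, run step, push children (stack top = list head;
-- Python pops from the end, so `extend`-then-pop visits children back to front, i.e. the
-- reversed children are consed on).  Python's final `return result` is reached with the
-- accumulator never None (some leaf is always produced); `.getD 0` totalises that read,
-- and the fuel-0 default is never reached (fuel starts at altMeasure of the initial stack,
-- which strictly bounds the number of iterations).
def altLoop (seq : List (List Int)) (height : Int) (fuel : Nat) (stack : List (Int × Int))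
    (result : Option Int) : Int :=
  match fuel with
  | 0 => result.getD 0  -- unreachable
  | fuel + 1 =>
    match stack with
    | [] => result.getD 0
    | (left, right) :: rest =>
      let s := altStep seq height left right
      if s.1 ≠ [] then
        altLoop seq height fuel (s.1.reverse ++ rest) result
      else
        altLoop seq height fuel rest
          (some (match result with
                 | none => s.2.getD 0
                 | some v => max v (s.2.getD 0)))

def divide_and_conquer_2d_search_alt (seq : List (List Int)) : Int :=
  let width := PySem.List.len (PySem.List.pyGetD seq 0 [])
  let height := PySem.List.len seq
  altLoop seq height (altMeasure [(0, width - 1)]) [(0, width - 1)] none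

-- ===== PRECONDITION & SPEC =====
-- Pre_ excludes the empty grid, an empty first row, and ragged grids with a row shorter than
-- row 0: there Python A raises IndexError on almost every instance, and where it happens to
-- return (the probed columns all exist) the survival is an accident of which columns the
-- search touches, so those inputs are excluded with the crashing ones.
def Pre_divide_and_conquer_2d_search (seq : List (List Int)) : Prop :=
  seq ≠ [] ∧ 1 ≤ (seq.headD []).length ∧ ∀ row ∈ seq, (seq.headD []).length ≤ row.length

instance (seq : List (List Int)) : Decidable (Pre_divide_and_conquer_2d_search seq) := by
  unfold Pre_divide_and_conquer_2d_search; infer_instance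

def pvWitness_divide_and_conquer_2d_search : List (List Int) := [[1, 2], [4, 3]]

def Spec_divide_and_conquer_2d_search (seq : List (List Int)) (out : Int) : Prop := out = divide_and_conquer_2d_search_alt seq
instance (seq : List (List Int)) (out : Int) : Decidable (Spec_divide_and_conquer_2d_search seq out) := by unfold Spec_divide_and_conquer_2d_search; infer_instance

-- ===== CLAIM (what is proved, stated in full; the proofs are below) =====
def Claim_equal_divide_and_conquer_2d_search : Prop := ∀ (seq : List (List Int)), Dom_divide_and_conquer_2d_search seq → Pre_divide_and_conquer_2d_search seq → Spec_divide_and_conquer_2d_search seq (divide_and_conquer_2d_search seq)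

-- ===== LEMMAS AND PROOFS =====

-- helper facts about A's window test and the Python floor division by 2
theorem dcGetVal_ne_none {seq : List (List Int)} {height left right pos_y pos_x : Int}
    (h : dcGetVal seq height left right pos_y pos_x ≠ none) :
    left ≤ pos_x ∧ pos_x ≤ right := by
  unfold dcGetVal at h
  split at h
  · next hc => exact ⟨hc.1, hc.2.1⟩
  · exact absurd rfl h

theorem pvFloordiv_two (d : Int) : PySem.Int.floordiv d 2 = d / 2 := by
  rw [show PySem.Int.floordiv d 2 = d.fdiv 2 from rfl]
  simp [Int.fdiv_eq_ediv]

-- A's recursion does not depend on the fuel, as long as the fuel is sufficient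
theorem dcRec_fuel (seq : List (List Int)) (height : Int) :
    ∀ (n fuel fuel' : Nat) (left right : Int), (right - left).toNat ≤ n →
      (right - left).toNat < fuel → (right - left).toNat < fuel' →
      dcRec seq height fuel left right = dcRec seq height fuel' left right := by
  intro n
  induction n using Nat.strong_induction_on with
  | _ n IH =>
    intro fuel fuel' left right hn hf hf'
    match fuel, fuel' with
    | f + 1, f' + 1 =>
      rw [dcRec, dcRec]
      have hfd := pvFloordiv_two (right - left)
      split_ifs with h1 h2 h3
      · have hl := dcGetVal_ne_none h1.1
        have hr := dcGetVal_ne_none h1.2.1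
        rw [IH ((left + PySem.Int.floordiv (right - left) 2 - 1 - left).toNat) (by omega)
              f f' left _ le_rfl (by omega) (by omega),
            IH ((right - (left + PySem.Int.floordiv (right - left) 2 + 1)).toNat) (by omega)
              f f' _ right le_rfl (by omega) (by omega)]
      · have hl := dcGetVal_ne_none h2.1
        exact IH ((left + PySem.Int.floordiv (right - left) 2 - 1 - left).toNat) (by omega)
          f f' left _ le_rfl (by omega) (by omega)
      · have hr := dcGetVal_ne_none h3.1
        exact IH ((right - (left + PySem.Int.floordiv (right - left) 2 + 1)).toNat) (by omega)
          f f' _ right le_rfl (by omega) (by omega)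
      · rfl

-- A's value on a window, with canonical (sufficient) fuel
def dcVal (seq : List (List Int)) (height left right : Int) : Int :=
  dcRec seq height ((right - left).toNat + 1) left right

theorem dcRec_eq_dcVal (seq : List (List Int)) (height : Int) (fuel : Nat) (left right : Int)
    (hf : (right - left).toNat < fuel) :
    dcRec seq height fuel left right = dcVal seq height left right :=
  dcRec_fuel seq height ((right - left).toNat) fuel ((right - left).toNat + 1) left right
    le_rfl hf (Nat.lt_succ_self _)

-- one accumulator update of B's loop
def pvMerge (result : Option Int) (v : Int) : Option Int :=
  some (match result with | none => v | some w => max w v)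

theorem pvMerge_pvMerge (res : Option Int) (a b : Int) :
    pvMerge (pvMerge res b) a = pvMerge res (max a b) := by
  unfold pvMerge
  cases res with
  | none => simp [max_comm]
  | some w => simp [max_assoc, max_comm b a]

-- B's val_at computes A's get_val (the bounds tests are the same four conjuncts),
-- and the two comprehensions are the same list
theorem altValAt_eq (seq : List (List Int)) (height left right pos_y px : Int) :
    altValAt seq height left right pos_y px = dcGetVal seq height left right pos_y px := rfl

theorem altColumn_eq (seq : List (List Int)) (pos_x : Int) :
    altColumn seq pos_x = dcSlice seq (PySem.List.len seq) pos_x := by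
  unfold altColumn dcSlice
  conv_lhs => rw [← PySem.List.map_pyGetD_pyRange_zero seq []]
  rw [List.map_map]
  rfl

-- B's step agrees case-by-case with one unfolding of A's recursion
theorem altStep_cases (seq : List (List Int)) (left right : Int) :
    (altStep seq (PySem.List.len seq) left right = ([], some (dcVal seq (PySem.List.len seq) left right))) ∨
    (∃ l' r', altStep seq (PySem.List.len seq) left right = ([(l', r')], none) ∧
       (r' - l').toNat < (right - left).toNat ∧
       dcVal seq (PySem.List.len seq) left right = dcVal seq (PySem.List.len seq) l' r') ∨
    (∃ l₁ r₁ l₂ r₂, altStep seq (PySem.List.len seq) left right = ([(l₁, r₁), (l₂, r₂)], none) ∧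
       (r₁ - l₁).toNat + 2 ≤ (right - left).toNat ∧ (r₂ - l₂).toNat + 2 ≤ (right - left).toNat ∧
       dcVal seq (PySem.List.len seq) left right = max (dcVal seq (PySem.List.len seq) l₁ r₁) (dcVal seq (PySem.List.len seq) l₂ r₂)) := by
  unfold dcVal
  rw [dcRec]
  unfold altStep
  simp only [altValAt_eq, altColumn_eq]
  have hf := pvFloordiv_two (right - left)
  split_ifs with h1 h2 h3 h4 h5 h6 h7 h8 h9
  · have hl := dcGetVal_ne_none h2.1
    have hr := dcGetVal_ne_none h2.2.1
    refine Or.inr (Or.inr ⟨_, _, _, _, rfl, by omega, by omega, ?_⟩)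
    rw [dcRec_eq_dcVal seq (PySem.List.len seq) _ left _ (by omega),
        dcRec_eq_dcVal seq (PySem.List.len seq) _ _ right (by omega)]
    rfl
  · exact absurd ⟨h1.1.1, h1.2.1.1, h1.1.2, h1.2.2⟩ h2
  · exact absurd h1.1 h3
  · exact absurd h1.1 h3
  · exact absurd ⟨⟨h6.1, h6.2.2.1⟩, ⟨h6.2.1, h6.2.2.2 ▸ h6.2.2.1⟩, h6.2.2.2⟩ h1
  · have hl := dcGetVal_ne_none h5.1
    refine Or.inr (Or.inl ⟨_, _, rfl, by omega, ?_⟩)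
    exact dcRec_eq_dcVal seq (PySem.List.len seq) _ left _ (by omega)
  · exact absurd ⟨⟨h8.1, h8.2.2.1⟩, ⟨h8.2.1, h8.2.2.2 ▸ h8.2.2.1⟩, h8.2.2.2⟩ h1
  · have hr := dcGetVal_ne_none h7.1
    refine Or.inr (Or.inl ⟨_, _, rfl, by omega, ?_⟩)
    exact dcRec_eq_dcVal seq (PySem.List.len seq) _ _ right (by omega)
  · exact absurd ⟨⟨h9.1, h9.2.2.1⟩, ⟨h9.2.1, h9.2.2.2 ▸ h9.2.2.1⟩, h9.2.2.2⟩ h1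
  · exact Or.inl rfl

theorem altStep_measure_lt (seq : List (List Int)) (left right : Int)
    (h : (altStep seq (PySem.List.len seq) left right).1 ≠ []) :
    altMeasure (altStep seq (PySem.List.len seq) left right).1 < 2 ^ ((right - left).toNat + 1) := by
  rcases altStep_cases seq left right with hc | ⟨l', r', hc, hm, -⟩ |
    ⟨l1, r1, l2, r2, hc, hm1, hm2, -⟩
  · rw [hc] at h; exact absurd rfl h
  · rw [hc]
    simp only [altMeasure, List.map_cons, List.map_nil, List.sum_cons, List.sum_nil,
      Nat.add_zero]
    exact Nat.pow_lt_pow_right (by norm_num) (by omega)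
  · rw [hc]
    simp only [altMeasure, List.map_cons, List.map_nil, List.sum_cons, List.sum_nil,
      Nat.add_zero]
    calc 2 ^ ((r1 - l1).toNat + 1) + 2 ^ ((r2 - l2).toNat + 1)
        ≤ 2 ^ ((right - left).toNat - 1) + 2 ^ ((right - left).toNat - 1) :=
          Nat.add_le_add (Nat.pow_le_pow_right (by norm_num) (by omega))
            (Nat.pow_le_pow_right (by norm_num) (by omega))
      _ = 2 ^ (right - left).toNat := by
          rw [← two_mul, ← pow_succ']
          congr 1
          omega
      _ < 2 ^ ((right - left).toNat + 1) := Nat.pow_lt_pow_right (by norm_num) (by omega)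

-- the fold B's loop computes: every window on the stack contributes A's value for it
def runStack (seq : List (List Int)) (height : Int) (stack : List (Int × Int))
    (result : Option Int) : Int :=
  (stack.foldl (fun acc p => pvMerge acc (dcVal seq height p.1 p.2)) result).getD 0

theorem altLoop_run (seq : List (List Int)) :
    ∀ (n fuel : Nat) (stack : List (Int × Int)) (result : Option Int),
      altMeasure stack ≤ n → altMeasure stack ≤ fuel →
      altLoop seq (PySem.List.len seq) fuel stack result = runStack seq (PySem.List.len seq) stack result := by
  intro n
  induction n using Nat.strong_induction_on with
  | _ n IH =>
    intro fuel stack result hn hfuel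
    match stack with
    | [] =>
      match fuel with
      | 0 => rfl
      | _ + 1 => rfl
    | (left, right) :: rest =>
      have hpos : 0 < 2 ^ ((right - left).toNat + 1) := Nat.two_pow_pos _
      have hsplit : altMeasure ((left, right) :: rest) =
          2 ^ ((right - left).toNat + 1) + altMeasure rest := by
        simp [altMeasure]
      match fuel with
      | 0 => omega
      | f + 1 =>
        rw [altLoop.eq_def]
        rcases altStep_cases seq left right with hc | ⟨l', r', hc, hm, hv⟩ |
          ⟨l1, r1, l2, r2, hc, hm1, hm2, hv⟩
        · simp only [hc, ne_eq, not_true_eq_false, if_false, Option.getD_some]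
          rw [IH (altMeasure rest) (by omega) f rest _ le_rfl (by omega)]
          unfold runStack
          simp only [List.foldl_cons]
          rfl
        · have hmlt : altMeasure ((l', r') :: rest) < altMeasure ((left, right) :: rest) := by
            simp only [altMeasure, List.map_cons, List.sum_cons]
            have := Nat.pow_lt_pow_right (a := 2) (by norm_num)
              (Nat.add_lt_add_right hm 1)
            omega
          simp only [hc, List.reverse_cons, List.reverse_nil, List.nil_append,
            List.cons_append, ne_eq, reduceCtorEq, not_false_eq_true, if_true,
            List.nil_append]
          rw [IH (altMeasure ((l', r') :: rest)) (by omega) f _ _ le_rfl (by omega)]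
          unfold runStack
          simp only [List.foldl_cons, hv]
        · have hm1' : 2 ^ ((r1 - l1).toNat + 1) + 2 ^ ((r2 - l2).toNat + 1) <
              2 ^ ((right - left).toNat + 1) := by
            have h' := altStep_measure_lt seq left right (by rw [hc]; simp)
            rw [hc] at h'
            simpa [altMeasure] using h'
          have hmlt : altMeasure ((l2, r2) :: (l1, r1) :: rest) <
              altMeasure ((left, right) :: rest) := by
            simp only [altMeasure, List.map_cons, List.sum_cons]
            omega
          simp only [hc, List.reverse_cons, List.reverse_nil, List.nil_append,
            List.cons_append, ne_eq, reduceCtorEq, not_false_eq_true, if_true,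
            List.nil_append]
          rw [IH (altMeasure ((l2, r2) :: (l1, r1) :: rest)) (by omega) f _ _ le_rfl (by omega)]
          unfold runStack
          simp only [List.foldl_cons, pvMerge_pvMerge, hv]

-- ===== VERDICT (by name: the statement is the Claim_ definition above) =====
theorem divide_and_conquer_2d_search_spec : Claim_equal_divide_and_conquer_2d_search := by
  intro seq _ _
  unfold Spec_divide_and_conquer_2d_search
  simp only [divide_and_conquer_2d_search, divide_and_conquer_2d_search_alt]
  rw [altLoop_run seq (altMeasure [(0, PySem.List.len (PySem.List.pyGetD seq 0 []) - 1)]) _ _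
      none le_rfl le_rfl]
  unfold runStack
  simp only [List.foldl_cons, List.foldl_nil]
  rw [dcRec_eq_dcVal seq _ _ 0 _ (by omega)]
  rfl
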